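-- pv_equiv track=rewrite | github.com/navneet-nv/swarmOps-at-12-56 | swarops2-main/backend/tools/csv_parser.py | segment_by_role
-- ===== SOURCE A (Python) =====
-- from typing import List, Dict, Any
--
-- def segment_by_role(participants: List[Dict[str, Any]]) -> Dict[str, List[Dict[str, Any]]]:
--     """Segment participants by role"""
--     segments = {}
--     for p in participants:
--         role = p.get('role', 'Participant')
--         if role not in segments:
--             segments[role] = []
--         segments[role].append(p)
--     return segments
-- ===== SOURCE B (Python) =====
-- def segment_by_role(participants):
--     """Segment participants by role (two passes: distinct roles, then a filter per role)."""
--     roles = []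
--     for p in participants:
--         r = p.get('role', 'Participant')
--         if r not in roles:
--             roles.append(r)
--     return {r: [p for p in participants if p.get('role', 'Participant') == r] for r in roles}
-- ===== Notes on version B (the rewrite author's own statement) =====
-- stated objective: alternative
-- what changed: B replaces A's single accumulate-into-dict pass with two phases: first collect the distinct roles in first-occurrence order, then build each group by filtering the participant list per role.
import Mathlib
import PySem

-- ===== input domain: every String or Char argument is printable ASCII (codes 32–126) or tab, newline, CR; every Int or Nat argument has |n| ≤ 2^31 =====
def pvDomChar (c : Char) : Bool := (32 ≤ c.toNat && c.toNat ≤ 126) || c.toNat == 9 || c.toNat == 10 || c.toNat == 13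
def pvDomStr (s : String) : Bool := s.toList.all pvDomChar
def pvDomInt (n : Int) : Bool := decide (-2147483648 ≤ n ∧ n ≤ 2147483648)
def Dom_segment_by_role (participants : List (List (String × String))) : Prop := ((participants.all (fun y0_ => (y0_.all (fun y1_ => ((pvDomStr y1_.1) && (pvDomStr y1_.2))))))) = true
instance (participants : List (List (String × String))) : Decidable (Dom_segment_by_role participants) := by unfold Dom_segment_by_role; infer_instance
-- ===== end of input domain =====

-- B groups participants in two passes (distinct roles, then a filter per role) instead of A's
-- single accumulate-into-dict pass; alternative decomposition, proved to return the same dict.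


-- ===== PORT A =====
-- p.get('role', 'Participant') on the participant assoc-list dict (shared by both ports)
def pvRole (p : List (String × String)) : String :=
  PySem.Dict.getD (PySem.Dict.mk p) "role" "Participant"

-- one iteration of A's loop body
def pvStep (segs : PySem.Dict String (List (List (String × String))))
    (p : List (String × String)) : PySem.Dict String (List (List (String × String))) :=
  (if segs.contains (pvRole p) then segs else segs.insert (pvRole p) []).modify
    (pvRole p) [] (fun l => l ++ [p])

def segment_by_role (participants : List (List (String × String))) : List (String × List (List (String × String))) :=
  (participants.foldl pvStep PySem.Dict.empty).items

-- ===== PORT B =====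
def segment_by_role_alt (participants : List (List (String × String))) : List (String × List (List (String × String))) :=
  let roles := participants.foldl (fun acc p =>
      let r := pvRole p
      if r ∈ acc then acc else acc ++ [r]) ([] : List String)
  roles.map (fun r => (r, participants.filter (fun p => pvRole p == r)))

-- ===== PRECONDITION & SPEC =====
def Spec_segment_by_role (participants : List (List (String × String))) (out : List (String × List (List (String × String)))) : Prop := out = segment_by_role_alt participants
instance (participants : List (List (String × String))) (out : List (String × List (List (String × String)))) : Decidable (Spec_segment_by_role participants out) := by unfold Spec_segment_by_role; infer_instance

-- ===== CLAIM (what is proved, stated in full; the proofs are below) =====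
def Claim_equal_segment_by_role : Prop := ∀ (participants : List (List (String × String))), Dom_segment_by_role participants → Spec_segment_by_role participants (segment_by_role participants)

-- ===== LEMMAS AND PROOFS =====

-- one A-step appends p to the group of its role and touches no other group
theorem pvStep_getD (d : PySem.Dict String (List (List (String × String))))
    (p : List (String × String)) (c : String) :
    (pvStep d p).getD c [] = d.getD c [] ++ (if pvRole p == c then [p] else []) := by
  unfold pvStep
  by_cases hc : d.contains (pvRole p) = true
  · rw [if_pos hc, PySem.Dict.getD_modify]
    by_cases he : c = pvRole p
    · simp [he]
    · simp [he, Ne.symm he]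
  · rw [if_neg hc]
    have h0 : d.getD (pvRole p) [] = [] :=
      PySem.Dict.getD_of_not_contains d [] (by simpa using hc)
    rw [PySem.Dict.getD_modify]
    by_cases he : c = pvRole p
    · simp [he, h0]
    · simp [he, Ne.symm he, PySem.Dict.getD_insert]

-- A's whole loop: the group of c is the filter of the input by role c
theorem pvFold_getD (ps : List (List (String × String)))
    (d : PySem.Dict String (List (List (String × String)))) (c : String) :
    (ps.foldl pvStep d).getD c [] = d.getD c [] ++ ps.filter (fun p => pvRole p == c) := by
  induction ps generalizing d with
  | nil => simp
  | cons p ps ih =>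
      simp only [List.foldl_cons, ih, pvStep_getD, List.filter_cons]
      by_cases h : pvRole p == c <;> simp [h]

-- A's loop collects keys exactly as B's first pass collects roles
theorem pvFold_keys (ps : List (List (String × String)))
    (d : PySem.Dict String (List (List (String × String)))) :
    (ps.foldl pvStep d).keys
      = ps.foldl (fun acc p => let r := pvRole p; if r ∈ acc then acc else acc ++ [r]) d.keys := by
  induction ps generalizing d with
  | nil => rfl
  | cons p ps ih =>
      have hstep : (pvStep d p).keys
          = if pvRole p ∈ d.keys then d.keys else d.keys ++ [pvRole p] := by
        unfold pvStep
        by_cases hc : d.contains (pvRole p) = true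
        · have hm : pvRole p ∈ d.keys := (PySem.Dict.contains_iff_mem_keys d (pvRole p)).mp hc
          rw [if_pos hc, PySem.Dict.keys_modify, if_pos hm,
            PySem.Dict.keys_insert_of_contains d _ hc]
        · have hm : pvRole p ∉ d.keys := fun h =>
            hc ((PySem.Dict.contains_iff_mem_keys d (pvRole p)).mpr h)
          rw [if_neg hc, PySem.Dict.keys_modify, if_neg hm,
            PySem.Dict.insert_insert_self,
            PySem.Dict.keys_insert_of_not_contains d _ (by simpa using hc)]
      simp only [List.foldl_cons, ih, hstep]

-- B's first pass keeps its accumulator duplicate-free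
theorem pvRolesNodup (ps : List (List (String × String))) (acc : List String) (h : acc.Nodup) :
    (ps.foldl (fun acc p => let r := pvRole p; if r ∈ acc then acc else acc ++ [r]) acc).Nodup := by
  induction ps generalizing acc with
  | nil => exact h
  | cons p ps ih =>
      simp only [List.foldl_cons]
      by_cases hm : pvRole p ∈ acc
      · simpa [hm] using ih acc h
      · simpa [hm] using ih (acc ++ [pvRole p]) (by simp [List.nodup_append, h]; exact fun a ha hEq => hm (hEq ▸ ha))

-- ===== VERDICT (by name: the statement is the Claim_ definition above) =====
theorem segment_by_role_spec : Claim_equal_segment_by_role := by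
  intro ps _
  unfold Spec_segment_by_role segment_by_role segment_by_role_alt
  have hkeys := pvFold_keys ps PySem.Dict.empty
  have hnd : (ps.foldl pvStep PySem.Dict.empty).keys.Nodup := by
    rw [hkeys]; exact pvRolesNodup ps _ (by rw [PySem.Dict.keys_empty]; exact List.nodup_nil)
  rw [PySem.Dict.items_eq_map_keys _ hnd ([] : List (List (String × String)))]
  rw [hkeys]
  simp only [PySem.Dict.keys_empty]
  exact List.map_congr_left fun r _ => by
    simp [pvFold_getD ps PySem.Dict.empty r]
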